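-- pv_equiv track=rewrite | github.com/miliar/Code_Jam_Webscraper | solutions_python/Problem_200/2626.py | f
-- ===== SOURCE A (Python) =====
-- def f(l):
--     p = 0
--     v = l[0]
--     for i, x in enumerate(l):
--         if x > v:
--             p, v = i, x
--         elif x < v:
--             return p
-- ===== SOURCE B (Python) =====
-- def f(l):
--     _ = l[0]  # preserve IndexError on empty input
--     for i in range(1, len(l)):
--         if l[i] < l[i - 1]:
--             return l.index(l[i - 1])
--     return None
-- ===== Notes on version B (the rewrite author's own statement) =====
-- stated objective: alternative
-- what changed: B drops A's running-max state entirely: it scans adjacent pairs for the first strict descent and returns l.index of the element before it (valid because the prefix before the first descent is non-decreasing, so that element is the running max and l.index gives its first occurrence = A's p).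
import Mathlib
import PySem

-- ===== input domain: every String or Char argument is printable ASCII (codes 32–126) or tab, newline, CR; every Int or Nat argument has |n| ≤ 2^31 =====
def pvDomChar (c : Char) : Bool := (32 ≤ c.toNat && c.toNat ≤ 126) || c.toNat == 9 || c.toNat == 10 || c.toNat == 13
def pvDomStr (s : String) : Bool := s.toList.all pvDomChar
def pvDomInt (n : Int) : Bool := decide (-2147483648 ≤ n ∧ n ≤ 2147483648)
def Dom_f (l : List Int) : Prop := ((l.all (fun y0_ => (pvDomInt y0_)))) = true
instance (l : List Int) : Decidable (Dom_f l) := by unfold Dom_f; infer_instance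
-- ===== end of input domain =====

-- B replaces A's running-max/peak-index state by a scan for the first strict adjacent
-- descent followed by l.index of the element before it (objective: alternative).

-- ===== PORT A =====
-- 'for i, x in enumerate(l)' as structural recursion on the list with an index counter i;
-- state (p, v) as in A, branches in A's order.
def fLoop : List Int → Int → Int → Int → Option Int
  | [], _, _, _ => none
  | x :: rest, i, p, v =>
    if x > v then fLoop rest (i + 1) i x
    else if x < v then some p
    else fLoop rest (i + 1) p v

def f (l : List Int) : Option Int :=
  match PySem.List.pyGet? l 0 with
  | none => none          -- l[0] raises IndexError: outside Pre_f
  | some v => fLoop l 0 0 v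

-- ===== PORT B =====
-- 'for i in range(1, len(l))' as recursion over the pyRange index list.
def fAltLoop (l : List Int) : List Int → Option Int
  | [] => none
  | i :: rest =>
    match PySem.List.pyGet? l i, PySem.List.pyGet? l (i - 1) with
    | some x, some prev =>
        if x < prev then (PySem.List.index? l prev).map (fun n => (n : Int))
        else fAltLoop l rest
    | _, _ => none        -- unreachable for i ∈ range(1, len l)
def f_alt (l : List Int) : Option Int :=
  match PySem.List.pyGet? l 0 with
  | none => none          -- l[0] raises IndexError: outside Pre_f
  | some _ => fAltLoop l (PySem.List.pyRange 1 (l.length : Int) 1)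

-- ===== PRECONDITION & SPEC =====
-- Pre_f excludes only the empty list, on which the Python A (and B) raise IndexError.
def Pre_f (l : List Int) : Prop := l ≠ []
instance (l : List Int) : Decidable (Pre_f l) := by unfold Pre_f; infer_instance
def pvWitness_f : List Int := [1, 3, 3, 2, 5]

def Spec_f (l : List Int) (out : Option Int) : Prop := out = f_alt l
instance (l : List Int) (out : Option Int) : Decidable (Spec_f l out) := by unfold Spec_f; infer_instance

-- ===== CLAIM (what is proved, stated in full; the proofs are below) =====
def Claim_equal_f : Prop := ∀ (l : List Int), Dom_f l → Pre_f l → Spec_f l (f l)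

-- ===== LEMMAS AND PROOFS =====

-- first-occurrence characterisation of index?
lemma index?_of_getElem {l : List Int} {k : Nat} {x : Int}
    (hk : k < l.length) (hx : l[k] = x) (hnot : x ∉ l.take k) :
    PySem.List.index? l x = some k := by
  rw [PySem.List.index?_eq_some_iff]
  refine ⟨l.take k, l.drop (k + 1), ?_, by simp [hk.le], hnot⟩
  conv_lhs => rw [← List.take_append_drop k l]
  congr 1
  rw [List.drop_eq_getElem_cons hk, hx]

-- main invariant lemma: from position k ≥ 1 on, A's loop with state (p, v) agrees
-- with B's scan, provided v = l[k-1] is the maximum of the prefix and p its first index.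
lemma key : ∀ (t : List Int) (k : Nat) (p v : Int) (l : List Int),
    l.drop k = t → 1 ≤ k → k ≤ l.length →
    (∀ h : k - 1 < l.length, l[k - 1] = v) →
    (∀ y ∈ l.take k, y ≤ v) →
    PySem.List.index? l v = some p.toNat → 0 ≤ p →
    fLoop t (k : Int) p v = fAltLoop l (PySem.List.pyRange (k : Int) (l.length : Int) 1) := by
  intro t
  induction t with
  | nil =>
    intro k p v l hdrop hk1 hkle hvk hmax hidx hp
    have hlen : l.length ≤ k := by
      by_contra h
      have := List.drop_eq_nil_iff.mp hdrop
      omega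
    have : k = l.length := le_antisymm hkle hlen
    rw [PySem.List.pyRange_one_eq_nil (by exact_mod_cast hlen)]
    simp [fLoop, fAltLoop]
  | cons x rest ih =>
    intro k p v l hdrop hk1 hkle hvk hmax hidx hp
    have hklt : k < l.length := by
      by_contra h
      have : l.drop k = [] := List.drop_eq_nil_iff.mpr (by omega)
      simp [this] at hdrop
    have hxk : l[k] = x := by
      have h0 : (l.drop k)[0]? = l[k + 0]? := List.getElem?_drop
      rw [hdrop] at h0
      simp only [List.getElem?_cons_zero, Nat.add_zero] at h0
      simpa [List.getElem?_eq_getElem hklt] using h0.symm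
    have hget_k : PySem.List.pyGet? l (k : Int) = some x := by
      rw [PySem.List.pyGet?_natCast]; simp [hxk, hklt]
    have hk1lt : k - 1 < l.length := by omega
    have hv : l[k - 1] = v := hvk hk1lt
    have hget_k1 : PySem.List.pyGet? l ((k : Int) - 1) = some v := by
      have : ((k : Int) - 1) = ((k - 1 : Nat) : Int) := by omega
      rw [this, PySem.List.pyGet?_natCast]
      simp [hv, hk1lt]
    rw [PySem.List.pyRange_one_cons (by exact_mod_cast hklt)]
    show fLoop (x :: rest) (k : Int) p v = fAltLoop l ((k : Int) :: PySem.List.pyRange ((k : Int) + 1) (l.length : Int) 1)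
    by_cases hgt : x > v
    · -- A updates p, v := k, x ; B continues
      have step : fLoop (x :: rest) (k : Int) p v = fLoop rest ((k : Int) + 1) (k : Int) x := by
        simp [fLoop, hgt]
      rw [step]
      have bstep : fAltLoop l ((k : Int) :: PySem.List.pyRange ((k : Int) + 1) (l.length : Int) 1)
          = fAltLoop l (PySem.List.pyRange ((k : Int) + 1) (l.length : Int) 1) := by
        simp only [fAltLoop, hget_k, hget_k1]
        rw [if_neg (by omega)]
      rw [bstep]
      have hidx' : PySem.List.index? l x = some (k : Int).toNat := by
        rw [Int.toNat_natCast]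
        refine index?_of_getElem hklt hxk ?_
        intro hmem
        have := hmax x hmem
        omega
      have := ih (k + 1) (k : Int) x l
        (by
          have h2 := congrArg (List.drop 1) hdrop
          simpa [List.drop_drop, Nat.add_comm] using h2)
        (by omega) (by omega)
        (by intro h; simpa using hxk)
        (by
          intro y hy
          rw [List.take_add_one] at hy
          simp at hy
          rcases hy with hy | hy
          · have := hmax y hy; omega
          · have hxy : x = y := by simpa [hklt, hxk] using hy
            omega)
        hidx' (by positivity)
      simpa using this
    · by_cases hlt : x < v
      · -- A returns p ; B returns index of prev = v
        have step : fLoop (x :: rest) (k : Int) p v = some p := by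
          simp [fLoop, hgt, hlt]
        rw [step]
        simp only [fAltLoop, hget_k, hget_k1]
        rw [if_pos hlt, hidx]
        simp [hp, Option.map_some]
      · -- x = v : both continue with unchanged state
        have hx : x = v := by omega
        have step : fLoop (x :: rest) (k : Int) p v = fLoop rest ((k : Int) + 1) p v := by
          simp [fLoop, hgt, hlt]
        rw [step]
        have bstep : fAltLoop l ((k : Int) :: PySem.List.pyRange ((k : Int) + 1) (l.length : Int) 1)
            = fAltLoop l (PySem.List.pyRange ((k : Int) + 1) (l.length : Int) 1) := by
          simp only [fAltLoop, hget_k, hget_k1]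
          rw [if_neg (by omega)]
        rw [bstep]
        have := ih (k + 1) p v l
          (by
            have h2 := congrArg (List.drop 1) hdrop
            simpa [List.drop_drop, Nat.add_comm] using h2)
          (by omega) (by omega)
          (by intro h; simpa [hx] using hxk)
          (by
            intro y hy
            rw [List.take_add_one] at hy
            simp at hy
            rcases hy with hy | hy
            · exact hmax y hy
            · have hxy : x = y := by simpa [hklt, hxk] using hy
              omega)
          hidx hp
        simpa using this

-- ===== VERDICT (by name: the statement is the Claim_ definition above) =====
theorem f_spec : Claim_equal_f := by
  intro l _ hpre
  unfold Spec_f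
  obtain ⟨v0, t, rfl⟩ : ∃ v0 t, l = v0 :: t := by
    cases l with
    | nil => exact absurd rfl hpre
    | cons a b => exact ⟨a, b, rfl⟩
  have step : fLoop (v0 :: t) 0 0 v0 = fLoop t 1 0 v0 := by
    simp [fLoop]
  simp only [f, f_alt, PySem.List.pyGet?_zero_cons]
  rw [step]
  have hidx : PySem.List.index? (v0 :: t) v0 = some (0 : Int).toNat := by
    simpa using PySem.List.index?_cons_self (x := v0) (xs := t)
  have := key t 1 0 v0 (v0 :: t) (by simp) (by omega) (by simp)
    (by intro h; simp) (by intro y hy; simp at hy; omega) hidx le_rfl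
  simpa using this
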